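-- pv_equiv track=rewrite | github.com/Melchiorium/-ThinkAgent-squad-ia-blackboard | app/agents/product_agent.py | _clean_prd_document
-- ===== SOURCE A (Python) =====
-- def _clean_prd_document(text: str) -> str:
--     forbidden_headings = (
--         "[please note",
--         "## architecture notes",
--         "## go-to-market notes",
--         "## Architecture Notes",
--         "## Review Summary",
--         "## Requested Changes",
--         "## Product Arbitration",
--         "## Risks",
--         "## Growth Review Notes",
--         "## Tech Review Notes",
--         "**Review Summary**",
--         "**Requested Changes:**",
--         "**Risks:**",
--         "**Tech Review Notes**",
--         "**Growth Review Notes**",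
--         "### Retained",
--         "### Deferred",
--         "### Rejected",
--         "### Open Points",
--         "### Rationales",
--     )
--     lines = text.splitlines()
--     cleaned_lines = []
--     for line in lines:
--         stripped = line.strip()
--         if not cleaned_lines and stripped.lower().startswith("[please note"):
--             continue
--         if stripped in forbidden_headings:
--             break
--         cleaned_lines.append(line)
--     return "\n".join(cleaned_lines).strip()
-- ===== SOURCE B (Python) =====
-- def _clean_prd_document(text: str) -> str:
--     forbidden_headings = (
--         "[please note",
--         "## architecture notes",
--         "## go-to-market notes",
--         "## Architecture Notes",
--         "## Review Summary",
--         "## Requested Changes",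
--         "## Product Arbitration",
--         "## Risks",
--         "## Growth Review Notes",
--         "## Tech Review Notes",
--         "**Review Summary**",
--         "**Requested Changes:**",
--         "**Risks:**",
--         "**Tech Review Notes**",
--         "**Growth Review Notes**",
--         "### Retained",
--         "### Deferred",
--         "### Rejected",
--         "### Open Points",
--         "### Rationales",
--     )
--     lines = text.splitlines()
--     stripped = [l.strip() for l in lines]
--     # phase 1: length of the leading block of "[please note" lines
--     start = 0
--     for s in stripped:
--         if not s.lower().startswith("[please note"):
--             break
--         start += 1
--     # phase 2: heading-major search — earliest first occurrence of any
--     # forbidden heading in the remaining stripped lines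
--     tail = stripped[start:]
--     cut = len(tail)
--     for h in forbidden_headings:
--         if h in tail:
--             cut = min(cut, tail.index(h))
--     return "\n".join(lines[start:start + cut]).strip()
-- ===== Notes on version B (the rewrite author's own statement) =====
-- stated objective: alternative
-- what changed: Replaces A's single line-major stateful loop (empty-accumulator flag, continue and break) with index arithmetic: count the leading please-note block, then a heading-major search taking the minimum first-occurrence index of each forbidden heading, and slice the line list between the two indices.
import Mathlib
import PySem

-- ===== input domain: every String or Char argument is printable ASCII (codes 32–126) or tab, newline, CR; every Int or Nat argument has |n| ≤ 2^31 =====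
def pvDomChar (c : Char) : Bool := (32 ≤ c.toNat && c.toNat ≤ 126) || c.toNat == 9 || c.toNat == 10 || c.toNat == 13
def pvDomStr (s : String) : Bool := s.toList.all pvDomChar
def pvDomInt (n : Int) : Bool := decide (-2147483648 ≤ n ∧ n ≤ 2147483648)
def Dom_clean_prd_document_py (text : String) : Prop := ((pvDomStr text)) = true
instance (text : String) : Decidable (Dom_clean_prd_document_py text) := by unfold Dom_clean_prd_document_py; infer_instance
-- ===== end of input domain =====

-- B replaces A's single line-major stateful loop with index arithmetic: count the
-- leading please-note block, then a heading-major minimum-first-occurrence search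
-- for the cut line, then one slice (alternative decomposition; same cost).


-- ===== PORT A =====
def pvForbidden : List String :=
  ["[please note", "## architecture notes", "## go-to-market notes", "## Architecture Notes",
   "## Review Summary", "## Requested Changes", "## Product Arbitration", "## Risks",
   "## Growth Review Notes", "## Tech Review Notes", "**Review Summary**",
   "**Requested Changes:**", "**Risks:**", "**Tech Review Notes**", "**Growth Review Notes**",
   "### Retained", "### Deferred", "### Rejected", "### Open Points", "### Rationales"]

-- the `for line in lines` loop with its `continue`/`break` and accumulator `cleaned_lines`
def pvLoopA : List String → List String → List String
  | [], acc => acc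
  | l :: ls, acc =>
      let stripped := PySem.Str.strip l
      if acc.isEmpty && PySem.Str.startswith (PySem.Str.lower stripped) "[please note" then
        pvLoopA ls acc
      else if stripped ∈ pvForbidden then acc
      else pvLoopA ls (acc ++ [l])

def clean_prd_document_py (text : String) : String :=
  PySem.Str.strip (PySem.Str.join "\n" (pvLoopA (PySem.Str.splitlines text) []))

-- ===== PORT B =====
-- phase 1 of Source B: `for s in stripped: if not …: break; start += 1`
def pvStartB : List String → Nat
  | [] => 0
  | s :: ss =>
      if PySem.Str.startswith (PySem.Str.lower s) "[please note" then pvStartB ss + 1 else 0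

def clean_prd_document_py_alt (text : String) : String :=
  let lines := PySem.Str.splitlines text
  let stripped := lines.map PySem.Str.strip
  let start := pvStartB stripped
  let tail := PySem.List.slice stripped (some (start : Int)) none
  -- phase 2 of Source B: `if h in tail: cut = min(cut, tail.index(h))` over the headings
  let cut := pvForbidden.foldl (fun c h =>
      match PySem.List.index? tail h with
      | some i => min c i
      | none => c) tail.length
  PySem.Str.strip (PySem.Str.join "\n"
    (PySem.List.slice lines (some (start : Int)) (some ((start : Int) + (cut : Int)))))

-- ===== PRECONDITION & SPEC =====
def Spec_clean_prd_document_py (text : String) (out : String) : Prop := out = clean_prd_document_py_alt text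
instance (text : String) (out : String) : Decidable (Spec_clean_prd_document_py text out) := by unfold Spec_clean_prd_document_py; infer_instance

-- ===== CLAIM (what is proved, stated in full; the proofs are below) =====
def Claim_equal_clean_prd_document_py : Prop := ∀ (text : String), Dom_clean_prd_document_py text → Spec_clean_prd_document_py text (clean_prd_document_py text)

-- ===== LEMMAS AND PROOFS =====

-- abbreviations for the two predicates (proof-side only)
def pvP (l : String) : Bool :=
  PySem.Str.startswith (PySem.Str.lower (PySem.Str.strip l)) "[please note"
def pvQ (l : String) : Bool := !(decide (PySem.Str.strip l ∈ pvForbidden))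
def pvQs (s : String) : Bool := !(decide (s ∈ pvForbidden))

-- A's loop, once the accumulator is nonempty, appends the takeWhile of the rest
theorem pvLoopA_ne_nil (ls acc : List String) (h : acc ≠ []) :
    pvLoopA ls acc = acc ++ ls.takeWhile pvQ := by
  induction ls generalizing acc with
  | nil => simp [pvLoopA]
  | cons l ls ih =>
      have hne : acc.isEmpty = false := by simpa using h
      simp only [pvLoopA, hne, Bool.false_and]
      rw [if_neg (by simp)]
      by_cases hf : PySem.Str.strip l ∈ pvForbidden
      · rw [if_pos hf, List.takeWhile_cons]
        simp [pvQ, hf]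
      · rw [if_neg hf, ih _ (by simp), List.takeWhile_cons]
        simp [pvQ, hf]

theorem pvLoopA_nil_eq (ls : List String) :
    pvLoopA ls [] = (ls.dropWhile pvP).takeWhile pvQ := by
  induction ls with
  | nil => simp [pvLoopA]
  | cons l ls ih =>
      simp only [pvLoopA, List.dropWhile_cons, List.isEmpty_nil, Bool.true_and]
      by_cases hp : pvP l = true
      · rw [if_pos (by simpa [pvP] using hp), if_pos hp]; exact ih
      · rw [if_neg (by simpa [pvP] using hp), if_neg hp, List.takeWhile_cons]
        by_cases hf : PySem.Str.strip l ∈ pvForbidden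
        · rw [if_pos hf]; simp [pvQ, hf]
        · rw [if_neg hf, pvLoopA_ne_nil _ _ (by simp)]; simp [pvQ, hf]

-- B's phase-1 counter is the length of the pvP-prefix of the unstripped lines
theorem pvStartB_eq (ls : List String) :
    pvStartB (ls.map PySem.Str.strip) = (ls.takeWhile pvP).length := by
  induction ls with
  | nil => simp [pvStartB]
  | cons l ls ih =>
      simp only [List.map_cons, pvStartB, List.takeWhile_cons]
      by_cases hp : pvP l = true
      · rw [if_pos (by simpa [pvP] using hp), if_pos hp]; simp [ih]
      · rw [if_neg (by simpa [pvP] using hp), if_neg hp]; simp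

-- the heading-major fold of Source B, named for the proofs
def pvFold (hs ts : List String) (acc : Nat) : Nat :=
  hs.foldl (fun c h =>
    match PySem.List.index? ts h with
    | some i => min c i
    | none => c) acc

theorem pvFold_cons_none (h : String) (hs ts : List String) (acc : Nat)
    (hidx : PySem.List.index? ts h = none) :
    pvFold (h :: hs) ts acc = pvFold hs ts acc := by
  simp only [pvFold, List.foldl_cons, hidx]

theorem pvFold_cons_some (h : String) (hs ts : List String) (acc i : Nat)
    (hidx : PySem.List.index? ts h = some i) :
    pvFold (h :: hs) ts acc = pvFold hs ts (min acc i) := by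
  simp only [pvFold, List.foldl_cons, hidx]

-- the same fold written with the total first-occurrence index List.idxOf
def pvFoldMin (hs : List String) (g : String → Nat) (acc : Nat) : Nat :=
  hs.foldl (fun c h => min c (g h)) acc

theorem pvFoldMin_le_acc (hs : List String) (g : String → Nat) (acc : Nat) :
    pvFoldMin hs g acc ≤ acc := by
  induction hs generalizing acc with
  | nil => simp [pvFoldMin]
  | cons h hs ih =>
      calc pvFoldMin (h :: hs) g acc = pvFoldMin hs g (min acc (g h)) := rfl
      _ ≤ min acc (g h) := ih _
      _ ≤ acc := min_le_left _ _

theorem pvFoldMin_le_g (hs : List String) (g : String → Nat) (acc : Nat)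
    (h : String) (hmem : h ∈ hs) : pvFoldMin hs g acc ≤ g h := by
  induction hs generalizing acc with
  | nil => cases hmem
  | cons h' hs ih =>
      rcases List.mem_cons.mp hmem with rfl | hmem'
      · calc pvFoldMin (h :: hs) g acc = pvFoldMin hs g (min acc (g h)) := rfl
        _ ≤ min acc (g h) := pvFoldMin_le_acc _ _ _
        _ ≤ g h := min_le_right _ _
      · exact ih (min acc (g h')) hmem'

theorem pvFoldMin_lb (hs : List String) (g : String → Nat) (acc m : Nat)
    (hacc : m ≤ acc) (hlb : ∀ h ∈ hs, m ≤ g h) : m ≤ pvFoldMin hs g acc := by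
  induction hs generalizing acc with
  | nil => simpa [pvFoldMin] using hacc
  | cons h hs ih =>
      exact ih (min acc (g h)) (le_min hacc (hlb h (List.mem_cons_self ..)))
        (fun h' hm => hlb h' (List.mem_cons_of_mem _ hm))

theorem pvFold_eq_min (hs ts : List String) (acc : Nat) (hacc : acc ≤ ts.length) :
    pvFold hs ts acc = pvFoldMin hs (fun h => ts.idxOf h) acc := by
  induction hs generalizing acc with
  | nil => simp [pvFold, pvFoldMin]
  | cons h hs ih =>
      have hstep : pvFoldMin (h :: hs) (fun h => ts.idxOf h) acc
          = pvFoldMin hs (fun h => ts.idxOf h) (min acc (ts.idxOf h)) := rfl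
      cases hidx : PySem.List.index? ts h with
      | none =>
          have hnm : h ∉ ts := (PySem.List.index?_eq_none_iff ts h).mp hidx
          have hlen : ts.idxOf h = ts.length := List.idxOf_of_notMem hnm
          rw [pvFold_cons_none _ _ _ _ hidx, hstep, hlen, Nat.min_eq_left hacc]
          exact ih acc hacc
      | some i =>
          have hi : ts.idxOf h = i := by
            have := PySem.List.index?_eq_idxOf? ts h
            rw [List.idxOf_eq_getD_idxOf?, ← this, hidx]; rfl
          rw [pvFold_cons_some _ _ _ _ _ hidx, hstep, hi]
          exact ih (min acc i) (le_trans (min_le_left _ _) hacc)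

theorem pvDrop_len_takeWhile (p : String → Bool) (ls : List String) :
    ls.drop (ls.takeWhile p).length = ls.dropWhile p := by
  induction ls with
  | nil => simp
  | cons a ls ih =>
      by_cases hp : p a <;>
        simp [hp, ih]

-- the fold over the heading tuple computes the length of the pvQs-prefix
theorem pvFold_eq_takeWhile (ts : List String) :
    pvFold pvForbidden ts ts.length = (ts.takeWhile pvQs).length := by
  have hTD : ts.takeWhile pvQs ++ ts.dropWhile pvQs = ts := List.takeWhile_append_dropWhile
  have hlenT : (ts.takeWhile pvQs).length ≤ ts.length :=
    List.Sublist.length_le (List.takeWhile_sublist _)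
  have hnotT : ∀ h ∈ pvForbidden, h ∉ ts.takeWhile pvQs := by
    intro h hF hmem
    have := List.mem_takeWhile_imp hmem
    simp only [pvQs, Bool.not_eq_eq_eq_not, Bool.not_true, decide_eq_false_iff_not] at this
    exact this hF
  have hidxF : ∀ h ∈ pvForbidden,
      ts.idxOf h = (ts.takeWhile pvQs).length + (ts.dropWhile pvQs).idxOf h := by
    intro h hF
    conv_lhs => rw [← hTD]
    exact List.idxOf_append_of_notMem (hnotT h hF)
  have hex : ∃ h ∈ pvForbidden, (ts.dropWhile pvQs).idxOf h = 0 := by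
    cases hD : ts.dropWhile pvQs with
    | nil => exact ⟨"[please note", by simp [pvForbidden], by simp⟩
    | cons d D' =>
        have hd : ¬ pvQs d := by
          have h0 : 0 < (ts.dropWhile pvQs).length := by simp [hD]
          have := List.dropWhile_get_zero_not pvQs ts h0
          simpa [hD] using this
        have hdF : d ∈ pvForbidden := by
          simp only [pvQs, Bool.not_eq_true, Bool.not_eq_false', decide_eq_true_eq] at hd
          exact hd
        exact ⟨d, hdF, by simp [List.idxOf_cons_self]⟩
  rw [pvFold_eq_min _ _ _ (le_refl _)]
  apply le_antisymm
  · obtain ⟨h0, hF0, h0z⟩ := hex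
    calc pvFoldMin pvForbidden (fun h => ts.idxOf h) ts.length ≤ ts.idxOf h0 :=
          pvFoldMin_le_g _ _ _ _ hF0
    _ = (ts.takeWhile pvQs).length := by simp [hidxF h0 hF0, h0z]
  · exact pvFoldMin_lb _ _ _ _ hlenT
      (fun h hF => by rw [hidxF h hF]; exact Nat.le_add_right _ _)

-- ===== VERDICT (by name: the statement is the Claim_ definition above) =====
theorem clean_prd_document_py_spec : Claim_equal_clean_prd_document_py := by
  intro text _
  unfold Spec_clean_prd_document_py clean_prd_document_py clean_prd_document_py_alt
  rw [pvLoopA_nil_eq]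
  congr 2
  generalize PySem.Str.splitlines text = ls
  rw [pvStartB_eq]
  rw [PySem.List.slice_from_natCast, PySem.List.slice_natCast_add]
  rw [← List.map_drop]
  rw [pvDrop_len_takeWhile pvP ls]
  have hfold : (pvForbidden.foldl (fun c h =>
      match PySem.List.index? ((ls.dropWhile pvP).map PySem.Str.strip) h with
      | some i => min c i
      | none => c) ((ls.dropWhile pvP).map PySem.Str.strip).length)
      = pvFold pvForbidden ((ls.dropWhile pvP).map PySem.Str.strip)
          ((ls.dropWhile pvP).map PySem.Str.strip).length := rfl
  rw [hfold, pvFold_eq_takeWhile]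
  rw [List.takeWhile_map]
  have hpq : (pvQs ∘ PySem.Str.strip) = pvQ := rfl
  rw [hpq, List.length_map]
  exact List.prefix_iff_eq_take.mp (List.takeWhile_prefix _)
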